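-- pv_equiv track=rewrite | github.com/yubo-research/yubo | problems/env_conf.py | _parse_tag_options
-- ===== SOURCE A (Python) =====
-- def _parse_tag_options(tag, obs_mode):
--     """Parse shared options from tag. Returns (tag, frozen_noise, obs_mode)."""
--     frozen_noise = False
--     while ":" in tag:
--         tag, opt = tag.rsplit(":", 1)
--         if opt == "fn":
--             frozen_noise = True
--         elif opt == "pixels":
--             obs_mode = "image" if obs_mode is None else obs_mode
--         else:
--             tag = f"{tag}:{opt}"
--             break
--     return tag, frozen_noise, obs_mode
-- ===== SOURCE B (Python) =====
-- def _parse_tag_options(tag, obs_mode):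
--     """Parse shared options from tag. Returns (tag, frozen_noise, obs_mode)."""
--     parts = tag.split(":")
--     # take-while: longest run of recognised option tokens at the right end,
--     # never touching parts[0]
--     opts = []
--     for p in reversed(parts[1:]):
--         if p == "fn" or p == "pixels":
--             opts.append(p)
--         else:
--             break
--     kept = parts[: len(parts) - len(opts)]
--     if obs_mode is None and "pixels" in opts:
--         obs_mode = "image"
--     return ":".join(kept), "fn" in opts, obs_mode
-- ===== Notes on version B (the rewrite author's own statement) =====
-- stated objective: simpler
-- what changed: B splits the tag once, take-whiles the longest run of recognised option tokens off the right end of the parts list (no state updates during the scan), and then derives all three results in one shot: join of the kept prefix, membership test 'fn' in opts, membership test 'pixels' in opts; A instead interleaves flag updates with repeated rsplit string surgery on a shrinking tag.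
import Mathlib
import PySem

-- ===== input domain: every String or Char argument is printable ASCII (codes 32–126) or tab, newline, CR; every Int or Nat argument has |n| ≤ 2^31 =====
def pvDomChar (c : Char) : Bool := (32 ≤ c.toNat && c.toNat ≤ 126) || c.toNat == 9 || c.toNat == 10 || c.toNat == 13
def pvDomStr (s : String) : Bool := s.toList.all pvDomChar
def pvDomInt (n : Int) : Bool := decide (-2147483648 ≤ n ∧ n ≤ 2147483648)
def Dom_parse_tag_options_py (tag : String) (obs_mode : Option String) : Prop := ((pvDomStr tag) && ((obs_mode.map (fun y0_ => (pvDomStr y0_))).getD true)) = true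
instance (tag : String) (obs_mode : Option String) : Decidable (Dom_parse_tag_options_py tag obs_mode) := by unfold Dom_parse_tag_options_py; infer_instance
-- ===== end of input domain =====

-- B splits the tag once, strips the longest run of recognised option tokens off the right end of
-- the parts list (stateless take-while), then derives all three results by join + membership
-- tests; A interleaves flag updates with repeated rsplit on a shrinking string (objective: simpler).

-- ===== PORT A =====
-- Hand port of `tag.rsplit(":", 1)`: splits at the LAST ':'; `none` exactly when ':' not in tag
-- (so matching on `none` is A's `":" in tag` loop test). Exact for a 1-char separator.
def pvRsplitColon (cs : List Char) : Option (List Char × List Char) :=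
  match cs with
  | [] => none
  | c :: rest =>
    match pvRsplitColon rest with
    | some (l, r) => some (c :: l, r)
    | none => if c = ':' then some ([], rest) else none

theorem pvRsplitColon_spec (cs : List Char) :
    (pvRsplitColon cs = none ∧ ':' ∉ cs) ∨
    (∃ l r, pvRsplitColon cs = some (l, r) ∧ cs = l ++ ':' :: r ∧ ':' ∉ r) := by
  induction cs with
  | nil => exact Or.inl ⟨rfl, by simp⟩
  | cons c rest ih =>
    rcases ih with ⟨hn, hm⟩ | ⟨l, r, hs, he, hr⟩
    · by_cases hc : c = ':'
      · exact Or.inr ⟨[], rest, by simp [pvRsplitColon, hn, hc], by simp [hc], hm⟩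
      · refine Or.inl ⟨by simp [pvRsplitColon, hn, hc], ?_⟩
        intro hmem
        rcases List.mem_cons.mp hmem with e | m
        · exact hc e.symm
        · exact hm m
    · exact Or.inr ⟨c :: l, r, by simp [pvRsplitColon, hs], by rw [he]; rfl, hr⟩

theorem pvRsplitColon_eq (cs l r : List Char) (h : pvRsplitColon cs = some (l, r)) :
    cs = l ++ ':' :: r ∧ ':' ∉ r := by
  rcases pvRsplitColon_spec cs with ⟨hn, _⟩ | ⟨l', r', hs, he, hr⟩
  · rw [hn] at h; cases h
  · rw [hs] at h
    simp only [Option.some.injEq, Prod.mk.injEq] at h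
    obtain ⟨h1, h2⟩ := h
    subst h1 h2
    exact ⟨he, hr⟩

theorem pvRsplitColon_len (cs l r : List Char) (h : pvRsplitColon cs = some (l, r)) :
    l.length < cs.length := by
  have := (pvRsplitColon_eq cs l r h).1
  subst this; simp

-- A's while loop: state (tag, frozen_noise, obs_mode); each iteration rsplits off the last segment.
def pvALoop (tag : List Char) (frozen : Bool) (obs : Option String) :
    List Char × Bool × Option String :=
  match h : pvRsplitColon tag with
  | none => (tag, frozen, obs)
  | some (l, opt) =>
    if opt = "fn".toList then pvALoop l true obs
    else if opt = "pixels".toList then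
      pvALoop l frozen (match obs with | none => some "image" | some s => some s)
    else (l ++ ':' :: opt, frozen, obs)
termination_by tag.length
decreasing_by all_goals exact pvRsplitColon_len _ _ _ h

def parse_tag_options_py (tag : String) (obs_mode : Option String) : String × Bool × Option String :=
  let (t, f, o) := pvALoop tag.toList false obs_mode
  (String.mk t, f, o)

-- ===== PORT B =====
-- Source B's for-with-break over reversed(parts[1:]): collect option tokens while they match, stop
-- at the first non-option (a take-while, transcribed as structural recursion).
def pvTakeOpts (ps : List (List Char)) : List (List Char) :=
  match ps with
  | [] => []
  | p :: rest =>
    if p = "fn".toList ∨ p = "pixels".toList then p :: pvTakeOpts rest else []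

-- `tag.split(":")` for a 1-char separator is List.splitOn; `":".join` is [':'].intercalate;
-- `parts[:len(parts)-len(opts)]` is List.take (the bound is a Nat here as in Python it is ≥ 1).
def parse_tag_options_py_alt (tag : String) (obs_mode : Option String) : String × Bool × Option String :=
  let parts := tag.toList.splitOn ':'
  let opts := pvTakeOpts (parts.drop 1).reverse
  let kept := parts.take (parts.length - opts.length)
  let obs := if obs_mode = none ∧ "pixels".toList ∈ opts then some "image" else obs_mode
  (String.mk ([':'].intercalate kept), decide ("fn".toList ∈ opts), obs)

-- ===== PRECONDITION & SPEC =====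
def Spec_parse_tag_options_py (tag : String) (obs_mode : Option String) (out : String × Bool × Option String) : Prop := out = parse_tag_options_py_alt tag obs_mode
instance (tag : String) (obs_mode : Option String) (out : String × Bool × Option String) : Decidable (Spec_parse_tag_options_py tag obs_mode out) := by unfold Spec_parse_tag_options_py; infer_instance

-- ===== CLAIM (what is proved, stated in full; the proofs are below) =====
def Claim_equal_parse_tag_options_py : Prop := ∀ (tag : String) (obs_mode : Option String), Dom_parse_tag_options_py tag obs_mode → Spec_parse_tag_options_py tag obs_mode (parse_tag_options_py tag obs_mode)

-- ===== LEMMAS AND PROOFS =====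

theorem pvRsplitColon_none (cs : List Char) (h : pvRsplitColon cs = none) : ':' ∉ cs := by
  rcases pvRsplitColon_spec cs with ⟨_, hm⟩ | ⟨l, r, hs, _, _⟩
  · exact hm
  · rw [hs] at h; cases h

theorem splitOn_of_not_mem (cs : List Char) (h : ':' ∉ cs) : cs.splitOn ':' = [cs] := by
  induction cs with
  | nil => rfl
  | cons c rest ih =>
    have hc : (c == ':') = false := by
      simp only [beq_eq_false_iff_ne, ne_eq]
      intro e; exact h (by rw [e]; exact List.mem_cons_self)
    have hr : ':' ∉ rest := fun m => h (List.mem_cons_of_mem _ m)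
    simp only [List.splitOn] at ih ⊢
    rw [List.splitOnP_cons, hc]
    simp only [Bool.false_eq_true, if_false]
    rw [ih hr]
    rfl

theorem splitOn_last (l r : List Char) (h : ':' ∉ r) :
    (l ++ ':' :: r).splitOn ':' = l.splitOn ':' ++ [r] := by
  induction l with
  | nil =>
    have hr : List.splitOnP (· == ':') r = [r] := by
      have := splitOn_of_not_mem r h
      simpa [List.splitOn] using this
    simp [List.splitOn, List.splitOnP_cons, hr]
  | cons c t ih =>
    simp only [List.cons_append, List.splitOn, List.splitOnP_cons] at ih ⊢
    by_cases hc : (c == ':') = true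
    · simp only [if_pos hc, ih, List.cons_append]
    · simp only [if_neg hc, ih]
      obtain ⟨a, t', e⟩ := List.exists_cons_of_ne_nil (List.splitOnP_ne_nil (· == ':') t)
      rw [e]
      rfl

-- B's core on a parts list, with A's accumulators generalised for the induction.
def pvBCore (parts : List (List Char)) (f : Bool) (o : Option String) :
    List (List Char) × Bool × Option String :=
  let opts := pvTakeOpts (parts.drop 1).reverse
  (parts.take (parts.length - opts.length),
   f || decide ("fn".toList ∈ opts),
   if o = none ∧ "pixels".toList ∈ opts then some "image" else o)

theorem pvALoop_eq_none (cs : List Char) (f : Bool) (o : Option String)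
    (h : pvRsplitColon cs = none) : pvALoop cs f o = (cs, f, o) := by
  rw [pvALoop.eq_def]
  split
  · rfl
  · rename_i l opt heq; rw [h] at heq; cases heq

theorem pvALoop_eq_some (cs l opt : List Char) (f : Bool) (o : Option String)
    (h : pvRsplitColon cs = some (l, opt)) :
    pvALoop cs f o =
      (if opt = "fn".toList then pvALoop l true o
       else if opt = "pixels".toList then
         pvALoop l f (match o with | none => some "image" | some s => some s)
       else (l ++ ':' :: opt, f, o)) := by
  rw [pvALoop.eq_def]
  split
  · rename_i heq; rw [h] at heq; cases heq
  · rename_i l' opt' heq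
    rw [h] at heq
    cases heq
    rfl

theorem pvKeptTake (sp : List (List Char)) (opt : List Char) (ts : List (List Char))
    (h : ts.length ≤ sp.length - 1) (hlp : 1 ≤ sp.length) :
    (sp ++ [opt]).take ((sp ++ [opt]).length - (opt :: ts).length)
      = sp.take (sp.length - ts.length) := by
  have hx : (sp ++ [opt]).length - (opt :: ts).length = sp.length - ts.length := by
    simp only [List.length_append, List.length_cons, List.length_nil]
    omega
  rw [hx, List.take_append_of_le_length (by omega)]

theorem pvMain (cs : List Char) (f : Bool) (o : Option String) :
    pvALoop cs f o =
      (let (k, f', o') := pvBCore (cs.splitOn ':') f o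
       ([':'].intercalate k, f', o')) := by
  induction hn : cs.length using Nat.strong_induction_on generalizing cs f o with
  | _ n ih =>
    cases h : pvRsplitColon cs with
    | none =>
      have hnm := pvRsplitColon_none cs h
      rw [pvALoop_eq_none cs f o h, splitOn_of_not_mem cs hnm]
      simp [pvBCore, pvTakeOpts, List.intercalate]
    | some p =>
      obtain ⟨l, opt⟩ := p
      obtain ⟨ecs, hno⟩ := pvRsplitColon_eq cs l opt h
      rw [pvALoop_eq_some cs l opt f o h]
      have hlen : l.length < n := by subst ecs hn; simp
      have hsplit : cs.splitOn ':' = l.splitOn ':' ++ [opt] := by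
        rw [ecs]; exact splitOn_last l opt hno
      have hne : l.splitOn ':' ≠ [] := List.splitOnP_ne_nil _ l
      have hlp : 1 ≤ (l.splitOn ':').length := List.length_pos_of_ne_nil hne
      have hdrop : ((l.splitOn ':' ++ [opt]).drop 1).reverse
          = opt :: ((l.splitOn ':').drop 1).reverse := by
        rw [List.drop_append_of_le_length hlp, List.reverse_append]; rfl
      have hto : (pvTakeOpts ((l.splitOn ':').drop 1).reverse).length
          ≤ (l.splitOn ':').length - 1 := by
        have h1 : ∀ ps : List (List Char), (pvTakeOpts ps).length ≤ ps.length := by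
          intro ps
          induction ps with
          | nil => simp [pvTakeOpts]
          | cons a t iht =>
            simp only [pvTakeOpts]
            split
            · simpa using Nat.succ_le_succ iht
            · simp
        calc (pvTakeOpts ((l.splitOn ':').drop 1).reverse).length
            ≤ (((l.splitOn ':').drop 1).reverse).length := h1 _
          _ = (l.splitOn ':').length - 1 := by simp
      have hkept := pvKeptTake (l.splitOn ':') opt
        (pvTakeOpts ((l.splitOn ':').drop 1).reverse) hto hlp
      by_cases h1 : opt = "fn".toList
      · rw [if_pos h1, ih l.length hlen l true o rfl]
        simp only [pvBCore, hsplit, hdrop, pvTakeOpts, if_pos (Or.inl h1), hkept]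
        simp only [Prod.mk.injEq, true_and]
        refine ⟨?_, ?_⟩
        · subst h1; simp
        · subst h1
          have : ("pixels".toList ∈ "fn".toList :: pvTakeOpts ((l.splitOn ':').drop 1).reverse)
              ↔ ("pixels".toList ∈ pvTakeOpts ((l.splitOn ':').drop 1).reverse) := by
            simp only [List.mem_cons, or_iff_right_iff_imp]
            intro e; exact absurd e (by decide)
          simp only [this]
      · by_cases h2 : opt = "pixels".toList
        · rw [if_neg h1, if_pos h2,
            ih l.length hlen l f (match o with | none => some "image" | some s => some s) rfl]
          simp only [pvBCore, hsplit, hdrop, pvTakeOpts, if_pos (Or.inr h2), hkept]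
          simp only [Prod.mk.injEq, true_and]
          refine ⟨?_, ?_⟩
          · subst h2
            have : ("fn".toList ∈ "pixels".toList :: pvTakeOpts ((l.splitOn ':').drop 1).reverse)
                ↔ ("fn".toList ∈ pvTakeOpts ((l.splitOn ':').drop 1).reverse) := by
              simp only [List.mem_cons, or_iff_right_iff_imp]
              intro e; exact absurd e (by decide)
            simp only [this]
          · subst h2
            cases o with
            | none => simp
            | some s => simp
        · rw [if_neg h1, if_neg h2]
          simp only [pvBCore, hsplit, hdrop, pvTakeOpts]
          rw [if_neg (by tauto)]
          simp only [List.length_nil, Nat.sub_zero, List.take_length,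
            List.not_mem_nil, and_false, if_false]
          have : [':'].intercalate (l.splitOn ':' ++ [opt]) = l ++ ':' :: opt := by
            rw [← hsplit, List.intercalate_splitOn, ecs]
          simp [this]

-- ===== VERDICT (by name: the statement is the Claim_ definition above) =====
theorem parse_tag_options_py_spec : Claim_equal_parse_tag_options_py := by
  intro tag obs_mode _
  show parse_tag_options_py tag obs_mode = parse_tag_options_py_alt tag obs_mode
  simp only [parse_tag_options_py, parse_tag_options_py_alt, pvMain, pvBCore, Bool.false_or]
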